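-- pv_equiv track=rewrite | github.com/NobuyukiInoue/Py_readExcelScripts | mylibs/excellibs.py | convertToAddress
-- ===== SOURCE A (Python) =====
-- def convertToAddress(row, col):
--     if col < 1:
--         return ""
--     temp = col - 1
--     target = []
--     while True:
--         mod = temp % 26
--         target.append(mod)
--         temp -= mod
--         if temp >= 26:
--             temp = int(temp / 26) - 1
--             continue
--         else:
--             break
--
--     result = ""
--     for i in range(len(target)):
--         result = chr(ord('A') + target[i]) + result
--
--     return result + str(row)
-- ===== SOURCE B (Python) =====
-- def convertToAddress(row, col):
--     if col < 1:
--         return ""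
--     # Find the letter count k and the first column index of the k-letter block
--     # (first = 1 + 26 + ... + 26**(k-1)), keeping span = 26**k.
--     k, first, span = 1, 1, 26
--     while col >= first + span:
--         first += span
--         span *= 26
--         k += 1
--     # col is the (n)-th address (0-based) of the k-letter block; emit its
--     # plain base-26 digits most-significant-first.
--     n = col - first
--     s = ""
--     while k > 0:
--         span //= 26
--         s += chr(ord('A') + n // span)
--         n %= span
--         k -= 1
--     return s + str(row)
-- ===== Notes on version B (the rewrite author's own statement) =====
-- stated objective: alternative
-- what changed: Instead of A's repeated-remainder recurrence (collect digits least-significant-first into a list, then a second reversal/formatting loop), B first locates the k-letter block by accumulating the powers 26+26^2+... and then emits the plain base-26 digits of the offset within that block most-significant-first by dividing by decreasing powers of 26.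
import Mathlib
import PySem

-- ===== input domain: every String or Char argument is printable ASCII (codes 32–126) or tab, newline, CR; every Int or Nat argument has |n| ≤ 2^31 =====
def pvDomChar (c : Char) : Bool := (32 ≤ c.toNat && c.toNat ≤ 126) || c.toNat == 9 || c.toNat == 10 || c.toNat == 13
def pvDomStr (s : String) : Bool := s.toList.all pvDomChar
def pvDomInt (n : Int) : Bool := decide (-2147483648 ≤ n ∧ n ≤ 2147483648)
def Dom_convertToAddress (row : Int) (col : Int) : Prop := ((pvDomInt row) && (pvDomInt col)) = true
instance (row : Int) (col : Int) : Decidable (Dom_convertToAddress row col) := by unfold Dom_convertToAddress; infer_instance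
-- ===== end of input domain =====

-- B replaces A's remainder-collection recurrence by a different algorithm: it first locates the
-- letter-count block (first = 1+26+...+26^(k-1)) and then emits the plain base-26 digits of the
-- block offset most-significant-first; return value equivalence is proved for all inputs.

-- ===== PORT A =====
-- chr(ord('A') + d) as a one-character string
def pvAChr (d : Int) : String := String.ofList [Char.ofNat (65 + d.toNat)]

-- A's 'while True' digit-collection loop; int(temp/26) is exact truncating division on Dom, ported
-- as Int.tdiv; the Nat fuel only makes the loop total (temp.toNat + 1 steps always suffice)
def pvALoop (fuel : Nat) (temp : Int) : List Int :=
  match fuel with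
  | 0 => []
  | fuel + 1 =>
    let m := PySem.Int.mod temp 26
    let t2 := temp - m
    if t2 ≥ 26 then m :: pvALoop fuel (t2.tdiv 26 - 1) else [m]

def convertToAddress (row : Int) (col : Int) : String :=
  if col < 1 then "" else
    let target := pvALoop ((col - 1).toNat + 1) (col - 1)
    let result := target.foldl (fun r d => pvAChr d ++ r) ""
    result ++ PySem.Int.toStr row

-- ===== PORT B =====
def pvBChr (d : Int) : String := String.ofList [Char.ofNat (65 + d.toNat)]

-- B's block-finding loop 'while col >= first + span: first += span; span *= 26; k += 1';
-- the Nat fuel only makes the loop total (col.toNat + 1 steps always suffice)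
def pvBFind (fuel : Nat) (col : Int) (k : Nat) (first span : Int) : Nat × Int × Int :=
  match fuel with
  | 0 => (k, first, span)
  | fuel + 1 =>
    if first + span ≤ col then pvBFind fuel col (k + 1) (first + span) (span * 26)
    else (k, first, span)

-- B's emission loop 'while k > 0: span //= 26; s += chr(ord('A') + n // span); n %= span; k -= 1'
def pvBEmit (n : Int) (k : Nat) (span : Int) (s : String) : String :=
  match k with
  | 0 => s
  | Nat.succ k' =>
    let span' := PySem.Int.floordiv span 26
    pvBEmit (PySem.Int.mod n span') k' span' (s ++ pvBChr (PySem.Int.floordiv n span'))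

def convertToAddress_alt (row : Int) (col : Int) : String :=
  if col < 1 then "" else
    let t := pvBFind (col.toNat + 1) col 1 1 26
    pvBEmit (col - t.2.1) t.1 t.2.2 "" ++ PySem.Int.toStr row

-- ===== PRECONDITION & SPEC =====
def Spec_convertToAddress (row : Int) (col : Int) (out : String) : Prop := out = convertToAddress_alt row col
instance (row : Int) (col : Int) (out : String) : Decidable (Spec_convertToAddress row col out) := by unfold Spec_convertToAddress; infer_instance

-- ===== CLAIM (what is proved, stated in full; the proofs are below) =====
def Claim_equal_convertToAddress : Prop := ∀ (row : Int) (col : Int), Dom_convertToAddress row col → Spec_convertToAddress row col (convertToAddress row col)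

-- ===== LEMMAS AND PROOFS =====

lemma pv_foldl_prep (l : List Int) (s : String) :
    l.foldl (fun r d => pvAChr d ++ r) s = l.foldl (fun r d => pvAChr d ++ r) "" ++ s := by
  induction l generalizing s with
  | nil => simp
  | cons a l ih =>
    simp only [List.foldl_cons]
    rw [ih (pvAChr a ++ s), ih (pvAChr a ++ "")]
    simp [String.append_assoc]

lemma pvBEmit_zero (n span : Int) (s : String) : pvBEmit n 0 span s = s := rfl

lemma pvBEmit_succ (n : Int) (k : Nat) (span : Int) (s : String) :
    pvBEmit n (k + 1) span s =
      pvBEmit (PySem.Int.mod n (PySem.Int.floordiv span 26)) k (PySem.Int.floordiv span 26)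
        (s ++ pvBChr (PySem.Int.floordiv n (PySem.Int.floordiv span 26))) := rfl

lemma pv_emit_prefix : ∀ (k : Nat) (n span : Int) (s : String),
    pvBEmit n k span s = s ++ pvBEmit n k span "" := by
  intro k
  induction k with
  | zero => intro n span s; simp [pvBEmit]
  | succ k ih =>
    intro n span s
    rw [pvBEmit_succ]
    conv_rhs => rw [pvBEmit_succ]
    rw [ih _ _ (s ++ _), ih _ _ ("" ++ _)]
    simp [String.append_assoc]

-- the fuel is irrelevant once it exceeds the number of loop iterations
lemma pv_aloop_fuel : ∀ (f1 f2 : Nat) (temp : Int), 0 ≤ temp → temp.toNat < f1 →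
    temp.toNat < f2 → pvALoop f1 temp = pvALoop f2 temp := by
  intro f1
  induction f1 with
  | zero => intro f2 temp _ h1 _; omega
  | succ f1 ih =>
    intro f2 temp h0 h1 h2
    match f2, h2 with
    | f2 + 1, h2 =>
      rw [pvALoop, pvALoop]
      have hm : PySem.Int.mod temp 26 = temp % 26 := PySem.Int.mod_eq_emod_of_pos (by norm_num)
      simp only [hm]
      by_cases hc : temp - temp % 26 ≥ 26
      · rw [if_pos hc, if_pos hc]
        have htd : (temp - temp % 26).tdiv 26 = (temp - temp % 26) / 26 :=
          Int.tdiv_eq_ediv_of_nonneg (by omega)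
        rw [htd, ih f2 ((temp - temp % 26) / 26 - 1) (by omega) (by omega) (by omega)]
      · rw [if_neg hc, if_neg hc]

lemma pv_bfind_fuel : ∀ (f1 f2 : Nat) (col : Int) (k : Nat) (first span : Int), 0 < span →
    (col - first).toNat < f1 → (col - first).toNat < f2 →
    pvBFind f1 col k first span = pvBFind f2 col k first span := by
  intro f1
  induction f1 with
  | zero => intro f2 col k first span _ h1 _; omega
  | succ f1 ih =>
    intro f2 col k first span hsp h1 h2
    match f2, h2 with
    | f2 + 1, h2 =>
      rw [pvBFind, pvBFind]
      by_cases hc : first + span ≤ col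
      · rw [if_pos hc, if_pos hc]
        exact ih f2 col (k + 1) (first + span) (span * 26) (by omega) (by omega) (by omega)
      · rw [if_neg hc, if_neg hc]

lemma pv_find_inv : ∀ (fuel : Nat) (col : Int) (k : Nat) (f sp : Int), (col - f).toNat < fuel →
    0 < sp → f ≤ col → sp = 26 ^ k →
    (pvBFind fuel col k f sp).2.1 ≤ col ∧
      col < (pvBFind fuel col k f sp).2.1 + (pvBFind fuel col k f sp).2.2 ∧
      (pvBFind fuel col k f sp).2.2 = 26 ^ (pvBFind fuel col k f sp).1 := by
  intro fuel
  induction fuel with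
  | zero => intro col k f sp h1 _ _ _; omega
  | succ fuel ih =>
    intro col k f sp hN hsp hf hpow
    rw [pvBFind]
    by_cases hc : f + sp ≤ col
    · rw [if_pos hc]
      exact ih col (k + 1) (f + sp) (sp * 26) (by omega) (by omega) (by omega)
        (by rw [hpow]; ring)
    · rw [if_neg hc]
      exact ⟨hf, by simp only []; omega, hpow⟩

-- the two find loops run in lockstep: the guards 'f + sp ≤ col'' and
-- '(26f+1) + 26sp ≤ 26col' + m + 1' are equivalent for 0 ≤ m < 26
lemma pv_find_shift : ∀ (fuel : Nat) (col' m : Int) (k : Nat) (f sp : Int), 0 ≤ m → m < 26 →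
    pvBFind fuel (26 * col' + m + 1) (k + 1) (26 * f + 1) (26 * sp) =
      ((pvBFind fuel col' k f sp).1 + 1, 26 * (pvBFind fuel col' k f sp).2.1 + 1,
        26 * (pvBFind fuel col' k f sp).2.2) := by
  intro fuel
  induction fuel with
  | zero => intro col' m k f sp _ _; rfl
  | succ fuel ih =>
    intro col' m k f sp hm0 hm26
    rw [pvBFind]
    conv_rhs => rw [pvBFind]
    by_cases hc : f + sp ≤ col'
    · rw [if_pos (show 26 * f + 1 + 26 * sp ≤ 26 * col' + m + 1 by omega), if_pos hc,
        show 26 * f + 1 + 26 * sp = 26 * (f + sp) + 1 by ring,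
        show 26 * sp * 26 = 26 * (sp * 26) by ring]
      exact ih col' m (k + 1) (f + sp) (sp * 26) hm0 hm26
    · rw [if_neg (show ¬ (26 * f + 1 + 26 * sp ≤ 26 * col' + m + 1) by omega), if_neg hc]

lemma pv_digit_split (n' m P : Int) (hP : 0 < P) (_hn : 0 ≤ n') (hm0 : 0 ≤ m) (hm26 : m < 26) :
    (26 * n' + m) / (26 * P) = n' / P ∧ (26 * n' + m) % (26 * P) = 26 * (n' % P) + m := by
  have h1 : P * (n' / P) + n' % P = n' := Int.mul_ediv_add_emod n' P
  have h2 : 0 ≤ n' % P := Int.emod_nonneg n' (by omega)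
  have h3 : n' % P < P := Int.emod_lt_of_pos n' hP
  have hsplit : 26 * n' + m = (26 * (n' % P) + m) + (n' / P) * (26 * P) := by
    nlinarith [h1]
  have hlo : 0 ≤ 26 * (n' % P) + m := by omega
  have hhi : 26 * (n' % P) + m < 26 * P := by omega
  constructor
  · rw [hsplit, Int.add_mul_ediv_right _ _ (by positivity : (0:Int) < 26 * P).ne',
      Int.ediv_eq_zero_of_lt hlo hhi, zero_add]
  · rw [hsplit, Int.add_mul_emod_self_right, Int.emod_eq_of_lt hlo hhi]

lemma pv_emit_shift : ∀ (k : Nat) (n' m : Int), 0 ≤ n' → n' < 26 ^ k → 0 ≤ m → m < 26 →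
    pvBEmit (26 * n' + m) (k + 1) (26 * 26 ^ k) "" = pvBEmit n' k (26 ^ k) "" ++ pvBChr m := by
  intro k
  induction k with
  | zero =>
    intro n' m hn0 hn1 hm0 hm26
    have hn : n' = 0 := by omega
    subst hn
    have h1 : PySem.Int.floordiv (26 * 26 ^ 0) 26 = 1 := by decide
    have h2 : PySem.Int.floordiv (26 * 0 + m) 1 = m := by
      rw [PySem.Int.floordiv_eq_ediv_of_pos (by norm_num)]
      omega
    rw [pvBEmit_succ, h1, h2]
    simp [pvBEmit_zero]
  | succ k ih =>
    intro n' m hn0 hn1 hm0 hm26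
    have hP : (0:Int) < 26 ^ k := by positivity
    obtain ⟨hdiv, hmod⟩ := pv_digit_split n' m (26 ^ k) hP hn0 hm0 hm26
    have hsp1 : PySem.Int.floordiv (26 * 26 ^ (k + 1)) 26 = 26 ^ (k + 1) := by
      rw [PySem.Int.floordiv_eq_ediv_of_pos (by norm_num),
        Int.mul_ediv_cancel_left _ (by norm_num)]
    have hsp2 : PySem.Int.floordiv ((26:Int) ^ (k + 1)) 26 = 26 ^ k := by
      rw [PySem.Int.floordiv_eq_ediv_of_pos (by norm_num), pow_succ, mul_comm,
        Int.mul_ediv_cancel_left _ (by norm_num)]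
    have hdig : PySem.Int.floordiv (26 * n' + m) (26 ^ (k + 1)) = n' / 26 ^ k := by
      rw [PySem.Int.floordiv_eq_ediv_of_pos (by positivity), pow_succ, mul_comm (26 ^ k) 26]
      exact hdiv
    have hrem : PySem.Int.mod (26 * n' + m) (26 ^ (k + 1)) = 26 * (n' % 26 ^ k) + m := by
      rw [PySem.Int.mod_eq_emod_of_pos (by positivity), pow_succ, mul_comm (26 ^ k) 26]
      exact hmod
    have hdig2 : PySem.Int.floordiv n' (26 ^ k) = n' / 26 ^ k :=
      PySem.Int.floordiv_eq_ediv_of_pos (by positivity)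
    have hrem2 : PySem.Int.mod n' (26 ^ k) = n' % 26 ^ k :=
      PySem.Int.mod_eq_emod_of_pos (by positivity)
    conv_lhs => rw [pvBEmit_succ]
    rw [hsp1, hdig, hrem]
    conv_rhs => rw [pvBEmit_succ]
    rw [hsp2, hdig2, hrem2]
    have hr0 : 0 ≤ n' % 26 ^ k := Int.emod_nonneg n' (by omega)
    have hr1 : n' % 26 ^ k < 26 ^ k := Int.emod_lt_of_pos n' hP
    rw [pv_emit_prefix (k + 1) _ _ ("" ++ pvBChr (n' / 26 ^ k)),
      pv_emit_prefix k _ _ ("" ++ pvBChr (n' / 26 ^ k)),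
      show (26:Int) ^ (k + 1) = 26 * 26 ^ k by rw [pow_succ]; ring,
      ih (n' % 26 ^ k) m hr0 hr1 hm0 hm26]
    simp [String.append_assoc]

lemma pv_key : ∀ (N : Nat) (col : Int), col.toNat = N → 1 ≤ col →
    (pvALoop ((col - 1).toNat + 1) (col - 1)).foldl (fun r d => pvAChr d ++ r) "" =
      pvBEmit (col - (pvBFind (col.toNat + 1) col 1 1 26).2.1) (pvBFind (col.toNat + 1) col 1 1 26).1
        (pvBFind (col.toNat + 1) col 1 1 26).2.2 "" := by
  intro N
  induction N using Nat.strong_induction_on with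
  | _ N ih =>
    intro col hN h1
    by_cases hbig : 27 ≤ col
    · -- recursive case: strip the least-significant letter from both sides
      have hm0 : (0:Int) ≤ (col - 1) % 26 := Int.emod_nonneg _ (by norm_num)
      have hm26 : (col - 1) % 26 < 26 := Int.emod_lt_of_pos _ (by norm_num)
      set m := (col - 1) % 26 with hm
      set col' := (col - 1) / 26 with hcol'
      have hdecomp : col = 26 * col' + m + 1 := by
        have := Int.mul_ediv_add_emod (col - 1) 26
        omega
      have hcol1 : 1 ≤ col' := by
        rw [hcol']
        omega
      have hmod : PySem.Int.mod (col - 1) 26 = m := PySem.Int.mod_eq_emod_of_pos (by norm_num)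
      have hA : pvALoop ((col - 1).toNat + 1) (col - 1) =
          m :: pvALoop ((col' - 1).toNat + 1) (col' - 1) := by
        rw [pvALoop]
        rw [hmod]
        rw [if_pos (show col - 1 - m ≥ 26 by omega)]
        rw [show col - 1 - m = 26 * col' by omega, Int.mul_tdiv_cancel_left _ (by norm_num)]
        rw [pv_aloop_fuel ((col - 1).toNat) ((col' - 1).toNat + 1) (col' - 1) (by omega)
          (by omega) (by omega)]
      set F := col.toNat + 1 with hF
      set t := pvBFind (col'.toNat + 1) col' 1 1 26 with ht
      have hstep : pvBFind (F - 1) col' 1 1 26 = t := by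
        rw [ht, pv_bfind_fuel (F - 1) (col'.toNat + 1) col' 1 1 26 (by norm_num)
          (by omega) (by omega)]
      have hstart : pvBFind F col' 0 0 1 = t := by
        have hF1 : F = (F - 1) + 1 := by omega
        rw [hF1, pvBFind, if_pos (by omega : (0:Int) + 1 ≤ col')]
        rw [show (0:Int) + 1 = 1 by norm_num, show (1:Int) * 26 = 26 by norm_num, hstep]
      have hshift : pvBFind F col 1 1 26 = (t.1 + 1, 26 * t.2.1 + 1, 26 * t.2.2) := by
        have h := pv_find_shift F col' m 0 0 1 hm0 hm26
        rw [hstart] at h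
        rw [hdecomp]
        simpa using h
      obtain ⟨hfle, hlt, hpow⟩ := pv_find_inv (col'.toNat + 1) col' 1 1 26 (by omega)
        (by norm_num) (by omega) (by norm_num)
      rw [← ht] at hfle hlt hpow
      have hn'0 : 0 ≤ col' - t.2.1 := by omega
      have hn'1 : col' - t.2.1 < 26 ^ t.1 := by omega
      have hcolsub : col - (26 * t.2.1 + 1) = 26 * (col' - t.2.1) + m := by omega
      rw [hA, hshift]
      simp only [List.foldl_cons]
      rw [pv_foldl_prep, ih col'.toNat (by omega) col' rfl hcol1, hcolsub, ← ht, hpow]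
      rw [pv_emit_shift t.1 (col' - t.2.1) m hn'0 hn'1 hm0 hm26]
      simp [pvAChr, pvBChr]
    · -- base case: 1 ≤ col ≤ 26, a single letter
      have hmod : PySem.Int.mod (col - 1) 26 = col - 1 := by
        rw [PySem.Int.mod_eq_emod_of_pos (by norm_num)]
        omega
      have hA : pvALoop ((col - 1).toNat + 1) (col - 1) = [col - 1] := by
        rw [pvALoop, hmod, if_neg (by omega)]
      have hB : pvBFind (col.toNat + 1) col 1 1 26 = (1, 1, 26) := by
        have : col.toNat + 1 = col.toNat + 1 := rfl
        rw [show col.toNat + 1 = (col.toNat) + 1 from rfl, pvBFind,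
          if_neg (by omega : ¬ ((1:Int) + 26 ≤ col))]
      rw [hA, hB]
      simp only [List.foldl_cons, List.foldl_nil]
      have hsp : PySem.Int.floordiv (26:Int) 26 = 1 := by decide
      have hd : PySem.Int.floordiv (col - 1) 1 = col - 1 := by
        rw [PySem.Int.floordiv_eq_ediv_of_pos (by norm_num)]
        omega
      rw [pvBEmit_succ, hsp, hd, pvBEmit_zero]
      simp [pvAChr, pvBChr]

-- ===== VERDICT (by name: the statement is the Claim_ definition above) =====
theorem convertToAddress_spec : Claim_equal_convertToAddress := by
  intro row col _
  unfold Spec_convertToAddress convertToAddress convertToAddress_alt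
  by_cases h : col < 1
  · simp [h]
  · simp only [h, if_false]
    rw [pv_key col.toNat col rfl (by omega)]
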